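-- pv_equiv track=rewrite | github.com/hotbreakb/Cooking | programmers/hotbreakb/순위 검색.py | solution
-- ===== SOURCE A (Python) =====
-- def solution(infos, query):
--     answer = []
--     participants_info = []
--     for info in infos:
--         participants_info.append(info.split())
--
--     for command in query:
--         # query -> "and" 지우기
--         command = command.replace(" and ", " ")
--         options = command.split()
--         participants_info_copied = participants_info.copy()
--
--         for i in range(len(options)):
--             if options[i] == "-":
--                 continue
--             if options[i].isdigit():
--                 participants_info_copied = list(filter(
--                     lambda participant: int(participant[i]) >= int(options[i]), participants_info_copied))
--             else:
--                 participants_info_copied = list(filter(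
--                     lambda participant: participant[i] == options[i], participants_info_copied))
--
--         answer.append(len(participants_info_copied))
--
--     return answer
-- ===== SOURCE B (Python) =====
-- def _columns(options):
--     eq_cols, num_cols = [], []
--     for i, o in enumerate(options):
--         if o == "-":
--             continue
--         if o.isdigit():
--             num_cols.append(i)
--         else:
--             eq_cols.append(i)
--     return eq_cols, num_cols
--
--
-- def _build_index(participants, eq_cols, num_cols):
--     index = {}
--     for p in participants:
--         key = tuple(p[i] for i in eq_cols)
--         index.setdefault(key, []).append([int(p[i]) for i in num_cols])
--     return index
--
--
-- def solution(infos, query):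
--     participants = [info.split() for info in infos]
--     answer = []
--     cache = {}
--     for command in query:
--         options = command.replace(" and ", " ").split()
--         eq_cols, num_cols = _columns(options)
--         sig = (tuple(eq_cols), tuple(num_cols))
--         if sig not in cache:
--             cache[sig] = _build_index(participants, eq_cols, num_cols)
--         bucket = cache[sig].get(tuple(options[i] for i in eq_cols), [])
--         thresholds = [int(options[i]) for i in num_cols]
--         count = 0
--         for vals in bucket:
--             if all(v >= t for v, t in zip(vals, thresholds)):
--                 count += 1
--         answer.append(count)
--     return answer
-- ===== Notes on version B (the rewrite author's own statement) =====
-- stated objective: faster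
-- what changed: A re-filters the full participant list column by column for every query; B groups the participants once per query signature into a hash index (equality-column key -> bucket of pre-parsed numeric fields), caches these indexes across queries, and answers each query by scanning only its own bucket.
-- outside the precondition, e.g. on solution(['x 1', 'y'], ['z 1']): A returns [0], B raises IndexError
import Mathlib
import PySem

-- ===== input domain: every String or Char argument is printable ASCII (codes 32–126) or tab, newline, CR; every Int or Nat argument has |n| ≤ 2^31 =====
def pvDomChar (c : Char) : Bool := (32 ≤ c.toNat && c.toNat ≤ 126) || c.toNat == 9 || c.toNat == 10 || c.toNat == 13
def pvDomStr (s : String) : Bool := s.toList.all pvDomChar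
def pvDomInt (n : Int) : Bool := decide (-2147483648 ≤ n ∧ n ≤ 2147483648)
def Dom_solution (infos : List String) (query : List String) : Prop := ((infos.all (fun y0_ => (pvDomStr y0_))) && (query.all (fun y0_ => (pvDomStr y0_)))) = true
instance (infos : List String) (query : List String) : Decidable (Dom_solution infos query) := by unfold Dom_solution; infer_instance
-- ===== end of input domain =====

-- B replaces A's per-query repeated list filtering by a hash index: participants are grouped
-- once per query signature (equality columns → bucket, numeric fields pre-parsed), cached
-- across queries, so each repeated-signature query only scans its own bucket.

-- ===== PORT A =====
def solution (infos : List String) (query : List String) : List Int :=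
  let answer : List Int := []
  let participants_info := infos.foldl (fun acc info => acc ++ [PySem.Str.split₀ info]) []
  query.foldl (fun answer command =>
    let command := PySem.Str.replace command " and " " "
    let options := PySem.Str.split₀ command
    let participants_info_copied := (PySem.List.pyRange 0 (options.length : Int) 1).foldl
      (fun parts i =>
        if PySem.List.pyGetD options i "" == "-" then parts
        else if PySem.Str.strIsdigit (PySem.List.pyGetD options i "") then
          parts.filter (fun participant =>
            decide ((PySem.Int.ofStr? (PySem.List.pyGetD participant i "")).getD 0 ≥
                    (PySem.Int.ofStr? (PySem.List.pyGetD options i "")).getD 0))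
        else
          parts.filter (fun participant =>
            PySem.List.pyGetD participant i "" == PySem.List.pyGetD options i ""))
      participants_info
    answer ++ [(participants_info_copied.length : Int)]) answer

-- ===== PORT B =====
-- port of Source B's _columns
def pvColumns (options : List String) : List Int × List Int :=
  (PySem.List.enumerate options 0).foldl
    (fun ec io =>
      if io.2 == "-" then ec
      else if PySem.Str.strIsdigit io.2 then (ec.1, ec.2 ++ [io.1])
      else (ec.1 ++ [io.1], ec.2))
    ([], [])

-- port of Source B's _build_index (dict.setdefault(k, []).append(v) is Dict.modify k [] (· ++ [v]))
def pvBuildIndex (participants : List (List String)) (eq_cols num_cols : List Int) :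
    PySem.Dict (List String) (List (List Int)) :=
  participants.foldl
    (fun index p =>
      index.modify (eq_cols.map (fun i => PySem.List.pyGetD p i "")) []
        (· ++ [num_cols.map (fun i => (PySem.Int.ofStr? (PySem.List.pyGetD p i "")).getD 0)]))
    PySem.Dict.empty

-- the body of Source B's `for command in query` loop, on the (answer, cache) state
def pvQueryStep (participants : List (List String))
    (st : List Int × PySem.Dict (List Int × List Int) (PySem.Dict (List String) (List (List Int))))
    (command : String) :
    List Int × PySem.Dict (List Int × List Int) (PySem.Dict (List String) (List (List Int))) :=
  let options := PySem.Str.split₀ (PySem.Str.replace command " and " " ")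
  let sig := pvColumns options
  let cache :=
    if st.2.contains sig then st.2
    else st.2.insert sig (pvBuildIndex participants sig.1 sig.2)
  let bucket := (cache.getD sig PySem.Dict.empty).getD
    (sig.1.map (fun i => PySem.List.pyGetD options i "")) []
  let thresholds := sig.2.map (fun i => (PySem.Int.ofStr? (PySem.List.pyGetD options i "")).getD 0)
  let count := bucket.foldl
    (fun c vals => if (vals.zip thresholds).all (fun vt => decide (vt.1 ≥ vt.2)) then c + 1 else c)
    (0 : Int)
  (st.1 ++ [count], cache)

def solution_alt (infos : List String) (query : List String) : List Int :=
  let participants := infos.map (fun info => PySem.Str.split₀ info)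
  (query.foldl (pvQueryStep participants) ([], PySem.Dict.empty)).1

-- ===== PRECONDITION & SPEC =====
-- Conservative closed-form bound: Pre_ requires every participant record to have a field at
-- every non-"-" option position of every query, with an int-parsable field at digit-option
-- positions; Python A is guaranteed to return there (A raises IndexError/ValueError on such a
-- record unless an earlier column already filtered it out — on those excluded-but-returning
-- inputs A's value is an accident of filter order, and B raises building its index).
def pvPreOne (c : String) (info : String) : Bool :=
  let opts := PySem.Str.split₀ (PySem.Str.replace c " and " " ")
  let p := PySem.Str.split₀ info
  (List.range opts.length).all (fun i =>
    let o := opts.getD i ""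
    o == "-" ||
      (decide (i < p.length) &&
        (!PySem.Str.strIsdigit o || (PySem.Int.ofStr? (p.getD i "")).isSome)))

def Pre_solution (infos : List String) (query : List String) : Prop :=
  (query.all (fun c => infos.all (fun info => pvPreOne c info))) = true

instance (infos : List String) (query : List String) : Decidable (Pre_solution infos query) := by
  unfold Pre_solution; infer_instance

def pvWitness_solution : List String × List String :=
  (["java backend junior pizza 150", "cpp frontend senior chicken 210"],
   ["java and backend and junior and pizza 100", "- and - and - and - 10"])

def Spec_solution (infos : List String) (query : List String) (out : List Int) : Prop := out = solution_alt infos query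
instance (infos : List String) (query : List String) (out : List Int) : Decidable (Spec_solution infos query out) := by unfold Spec_solution; infer_instance

-- ===== CLAIM (what is proved, stated in full; the proofs are below) =====
def Claim_equal_solution : Prop := ∀ (infos : List String) (query : List String), Dom_solution infos query → Pre_solution infos query → Spec_solution infos query (solution infos query)

-- ===== LEMMAS AND PROOFS =====

-- column-i test of A, as one boolean (true on the "-" column)
def pvColOK (options : List String) (i : Int) (p : List String) : Bool :=
  if PySem.List.pyGetD options i "" == "-" then true
  else if PySem.Str.strIsdigit (PySem.List.pyGetD options i "") then
    decide ((PySem.Int.ofStr? (PySem.List.pyGetD p i "")).getD 0 ≥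
            (PySem.Int.ofStr? (PySem.List.pyGetD options i "")).getD 0)
  else PySem.List.pyGetD p i "" == PySem.List.pyGetD options i ""

def pvOget (options : List String) (i : Int) : String := PySem.List.pyGetD options i ""

def pvEqColsOf (options : List String) : List Int :=
  (PySem.List.pyRange 0 (options.length : Int) 1).filter
    (fun i => !(pvOget options i == "-") && !PySem.Str.strIsdigit (pvOget options i))

def pvNumColsOf (options : List String) : List Int :=
  (PySem.List.pyRange 0 (options.length : Int) 1).filter
    (fun i => !(pvOget options i == "-") && PySem.Str.strIsdigit (pvOget options i))

-- A's value on one query, as a named function of the command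
def pvAnsA (participants : List (List String)) (c : String) : Int :=
  ((participants.filter
      (fun p => (PySem.List.pyRange 0
          ((PySem.Str.split₀ (PySem.Str.replace c " and " " ")).length : Int) 1).all
        (fun i => pvColOK (PySem.Str.split₀ (PySem.Str.replace c " and " " ")) i p))).length : Int)

-- cache invariant: every cached index is the index of its signature
def pvInv (participants : List (List String))
    (cache : PySem.Dict (List Int × List Int) (PySem.Dict (List String) (List (List Int)))) : Prop :=
  ∀ sig idx, cache.get? sig = some idx → idx = pvBuildIndex participants sig.1 sig.2

-- one step of A's column loop is a filter by pvColOK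
theorem pvStep_eq_filter (options : List String) (i : Int) (parts : List (List String)) :
    (if PySem.List.pyGetD options i "" == "-" then parts
     else if PySem.Str.strIsdigit (PySem.List.pyGetD options i "") then
       parts.filter (fun participant =>
         decide ((PySem.Int.ofStr? (PySem.List.pyGetD participant i "")).getD 0 ≥
                 (PySem.Int.ofStr? (PySem.List.pyGetD options i "")).getD 0))
     else
       parts.filter (fun participant =>
         PySem.List.pyGetD participant i "" == PySem.List.pyGetD options i ""))
    = parts.filter (pvColOK options i) := by
  split_ifs with h1 h2
  · exact (List.filter_eq_self.mpr fun p _ => by unfold pvColOK; rw [if_pos h1]).symm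
  · exact List.filter_congr fun p _ => by unfold pvColOK; rw [if_neg h1, if_pos h2]
  · exact List.filter_congr fun p _ => by unfold pvColOK; rw [if_neg h1, if_neg h2]

-- A's sequence of per-column filters is one filter by the conjunction of the column tests
theorem pvFoldFilter (options : List String) (idxs : List Int) (parts : List (List String)) :
    idxs.foldl
      (fun parts i =>
        if PySem.List.pyGetD options i "" == "-" then parts
        else if PySem.Str.strIsdigit (PySem.List.pyGetD options i "") then
          parts.filter (fun participant =>
            decide ((PySem.Int.ofStr? (PySem.List.pyGetD participant i "")).getD 0 ≥
                    (PySem.Int.ofStr? (PySem.List.pyGetD options i "")).getD 0))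
        else
          parts.filter (fun participant =>
            PySem.List.pyGetD participant i "" == PySem.List.pyGetD options i ""))
      parts
    = parts.filter (fun p => idxs.all (fun i => pvColOK options i p)) := by
  induction idxs generalizing parts with
  | nil => simp
  | cons i idxs ih =>
    rw [List.foldl_cons, ih, pvStep_eq_filter, List.filter_filter]
    refine List.filter_congr (fun p _ => ?_)
    simp [Bool.and_comm]

-- _columns on any pair list (induction form)
theorem pvColumnsFold (l : List (Int × String)) (e n : List Int) :
    l.foldl
      (fun ec io =>
        if io.2 == "-" then ec
        else if PySem.Str.strIsdigit io.2 then (ec.1, ec.2 ++ [io.1])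
        else (ec.1 ++ [io.1], ec.2))
      (e, n)
    = (e ++ (l.filter (fun io => !(io.2 == "-") && !PySem.Str.strIsdigit io.2)).map (·.1),
       n ++ (l.filter (fun io => !(io.2 == "-") && PySem.Str.strIsdigit io.2)).map (·.1)) := by
  induction l generalizing e n with
  | nil => simp
  | cons io l ih =>
    rw [List.foldl_cons]
    by_cases h1 : (io.2 == "-") = true
    · rw [if_pos h1, ih]
      simp [h1]
    · have hf1 : (io.2 == "-") = false := by simp_all
      rw [if_neg h1]
      by_cases h2 : PySem.Str.strIsdigit io.2 = true
      · have h2' : PySem.Chars.strIsdigit io.2.toList = true := by simpa using h2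
        rw [if_pos h2, ih]
        simp [hf1, h2']
      · have hf2' : PySem.Chars.strIsdigit io.2.toList = false := by simp_all
        rw [if_neg h2, ih]
        simp [hf1, hf2']

-- _columns computes exactly the two range-filters
theorem pvColumns_eq (options : List String) :
    pvColumns options = (pvEqColsOf options, pvNumColsOf options) := by
  unfold pvColumns pvEqColsOf pvNumColsOf
  rw [PySem.List.enumerate_eq_map_pyRange options "", pvColumnsFold]
  simp [List.filter_map, List.map_map, Function.comp_def, pvOget]

-- the bucket of the index at any key is the filtered, mapped participant list
theorem pvBucket (participants : List (List String)) (E N : List Int) (qkey : List String) :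
    (pvBuildIndex participants E N).getD qkey []
      = (participants.filter (fun p => E.map (fun i => PySem.List.pyGetD p i "") == qkey)).map
          (fun p => N.map (fun i => (PySem.Int.ofStr? (PySem.List.pyGetD p i "")).getD 0)) := by
  unfold pvBuildIndex
  have hm := List.foldl_map
    (f := fun p : List String =>
      (E.map (fun i => PySem.List.pyGetD p i ""),
       N.map (fun i => (PySem.Int.ofStr? (PySem.List.pyGetD p i "")).getD 0)))
    (g := fun (d : PySem.Dict (List String) (List (List Int))) q => d.modify q.1 [] (· ++ [q.2]))
    (l := participants) (init := PySem.Dict.empty)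
  rw [← hm, PySem.Dict.getD_foldl_modify_append, PySem.Dict.getD_empty, List.nil_append,
      List.filter_map, List.map_map]
  rfl

-- the counting loop is countP
theorem pvCountLoop (bucket : List (List Int)) (thr : List Int) :
    bucket.foldl
      (fun c vals => if (vals.zip thr).all (fun vt => decide (vt.1 ≥ vt.2)) then c + 1 else c)
      (0 : Int)
    = (bucket.countP (fun vals => (vals.zip thr).all (fun vt => decide (vt.1 ≥ vt.2))) : Int) := by
  rw [PySem.List.foldl_if_add_one, zero_add]

-- pointwise: B's bucket test equals A's conjunction of column tests
theorem pvPointwise (options : List String) (p : List String) :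
    ((((pvNumColsOf options).map (fun i => (PySem.Int.ofStr? (PySem.List.pyGetD p i "")).getD 0)).zip
        ((pvNumColsOf options).map (fun i => (PySem.Int.ofStr? (PySem.List.pyGetD options i "")).getD 0))).all
          (fun vt => decide (vt.1 ≥ vt.2))
      && ((pvEqColsOf options).map (fun i => PySem.List.pyGetD p i "")
            == (pvEqColsOf options).map (fun i => PySem.List.pyGetD options i "")))
    = (PySem.List.pyRange 0 (options.length : Int) 1).all (fun i => pvColOK options i p) := by
  rw [Bool.eq_iff_iff]
  rw [Bool.and_eq_true, List.zip_map', List.all_map]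
  simp only [List.all_eq_true, beq_iff_eq, List.map_inj_left, Function.comp_def]
  constructor
  · rintro ⟨hnum, hkey⟩ i hi
    unfold pvColOK
    split_ifs with hd hg
    · rfl
    · have hiN : i ∈ pvNumColsOf options := by
        unfold pvNumColsOf
        rw [List.mem_filter]
        refine ⟨hi, ?_⟩
        simp only [pvOget]
        simp [hd]
        simpa using hg
      simpa using hnum i hiN
    · have hiE : i ∈ pvEqColsOf options := by
        unfold pvEqColsOf
        rw [List.mem_filter]
        refine ⟨hi, ?_⟩
        simp only [pvOget]
        simp [hd]
        simpa using hg
      simp [hkey i hiE]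
  · intro h
    constructor
    · intro i hiN
      obtain ⟨hi, hcond⟩ := List.mem_filter.mp hiN
      have hd : ¬((PySem.List.pyGetD options i "" == "-") = true) := by
        simp only [pvOget] at hcond; simp_all
      have hg : PySem.Str.strIsdigit (PySem.List.pyGetD options i "") = true := by
        simp only [pvOget] at hcond; simp_all
      have := h i hi
      unfold pvColOK at this
      rw [if_neg hd, if_pos hg] at this
      simpa using this
    · intro i hiE
      obtain ⟨hi, hcond⟩ := List.mem_filter.mp hiE
      have hd : ¬((PySem.List.pyGetD options i "" == "-") = true) := by
        simp only [pvOget] at hcond; simp_all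
      have hg : ¬(PySem.Str.strIsdigit (PySem.List.pyGetD options i "") = true) := by
        simp only [pvOget] at hcond; simp_all
      have := h i hi
      unfold pvColOK at this
      rw [if_neg hd, if_neg hg] at this
      simpa using this

-- one query step, decomposed into named pieces (definitionally equal to the port's step)
def pvCacheF (participants : List (List String))
    (cache : PySem.Dict (List Int × List Int) (PySem.Dict (List String) (List (List Int))))
    (c : String) :
    PySem.Dict (List Int × List Int) (PySem.Dict (List String) (List (List Int))) :=
  let options := PySem.Str.split₀ (PySem.Str.replace c " and " " ")
  let sig := pvColumns options
  if cache.contains sig then cache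
  else cache.insert sig (pvBuildIndex participants sig.1 sig.2)

def pvCnt (participants : List (List String))
    (cache : PySem.Dict (List Int × List Int) (PySem.Dict (List String) (List (List Int))))
    (c : String) : Int :=
  (((pvCacheF participants cache c).getD
      (pvColumns (PySem.Str.split₀ (PySem.Str.replace c " and " " "))) PySem.Dict.empty).getD
      ((pvColumns (PySem.Str.split₀ (PySem.Str.replace c " and " " "))).1.map
        (fun i => PySem.List.pyGetD (PySem.Str.split₀ (PySem.Str.replace c " and " " ")) i "")) []).foldl
    (fun cnt vals =>
      if (vals.zip ((pvColumns (PySem.Str.split₀ (PySem.Str.replace c " and " " "))).2.map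
            (fun i => (PySem.Int.ofStr? (PySem.List.pyGetD
              (PySem.Str.split₀ (PySem.Str.replace c " and " " ")) i "")).getD 0))).all
          (fun vt => decide (vt.1 ≥ vt.2))
      then cnt + 1 else cnt)
    (0 : Int)

theorem pvStepDecomp (participants : List (List String)) (ans : List Int)
    (cache : PySem.Dict (List Int × List Int) (PySem.Dict (List String) (List (List Int))))
    (c : String) :
    pvQueryStep participants (ans, cache) c
      = (ans ++ [pvCnt participants cache c], pvCacheF participants cache c) := rfl

theorem pvCacheF_inv (participants : List (List String))
    (cache : PySem.Dict (List Int × List Int) (PySem.Dict (List String) (List (List Int))))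
    (c : String) (hinv : pvInv participants cache) :
    pvInv participants (pvCacheF participants cache c) := by
  unfold pvCacheF
  by_cases hc : cache.contains (pvColumns (PySem.Str.split₀ (PySem.Str.replace c " and " " "))) = true
  · rw [if_pos hc]; exact hinv
  · rw [if_neg hc]
    intro sig idx hx
    rw [PySem.Dict.get?_insert] at hx
    by_cases hs : sig = pvColumns (PySem.Str.split₀ (PySem.Str.replace c " and " " "))
    · rw [if_pos hs] at hx
      cases hx
      rw [hs]
    · rw [if_neg hs] at hx
      exact hinv _ _ hx

theorem pvCacheF_getD (participants : List (List String))
    (cache : PySem.Dict (List Int × List Int) (PySem.Dict (List String) (List (List Int))))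
    (c : String) (hinv : pvInv participants cache) :
    (pvCacheF participants cache c).getD
        (pvColumns (PySem.Str.split₀ (PySem.Str.replace c " and " " "))) PySem.Dict.empty
      = pvBuildIndex participants
          (pvColumns (PySem.Str.split₀ (PySem.Str.replace c " and " " "))).1
          (pvColumns (PySem.Str.split₀ (PySem.Str.replace c " and " " "))).2 := by
  unfold pvCacheF
  by_cases hc : cache.contains (pvColumns (PySem.Str.split₀ (PySem.Str.replace c " and " " "))) = true
  · rw [if_pos hc]
    cases hx : cache.get? (pvColumns (PySem.Str.split₀ (PySem.Str.replace c " and " " "))) with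
    | none =>
      rw [PySem.Dict.contains_eq_isSome_get?, hx] at hc
      simp at hc
    | some idx =>
      rw [PySem.Dict.getD_eq_get?_getD, hx]
      exact hinv _ _ hx
  · rw [if_neg hc, PySem.Dict.getD_insert_self]

set_option maxHeartbeats 2000000 in
theorem pvCnt_eq (participants : List (List String))
    (cache : PySem.Dict (List Int × List Int) (PySem.Dict (List String) (List (List Int))))
    (c : String) (hinv : pvInv participants cache) :
    pvCnt participants cache c = pvAnsA participants c := by
  unfold pvCnt
  rw [pvCacheF_getD participants cache c hinv]
  rw [pvColumns_eq]
  dsimp only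
  rw [pvBucket, pvCountLoop, List.countP_map, List.countP_filter]
  unfold pvAnsA
  rw [← List.countP_eq_length_filter]
  exact congrArg Nat.cast (List.countP_congr (fun p _ => by
    simp only [Function.comp_def]
    rw [pvPointwise]))

theorem pvStepCorrect (participants : List (List String)) (ans : List Int)
    (cache : PySem.Dict (List Int × List Int) (PySem.Dict (List String) (List (List Int))))
    (c : String) (hinv : pvInv participants cache) :
    (pvQueryStep participants (ans, cache) c).1 = ans ++ [pvAnsA participants c]
      ∧ pvInv participants (pvQueryStep participants (ans, cache) c).2 := by
  rw [pvStepDecomp]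
  exact ⟨by rw [pvCnt_eq participants cache c hinv], pvCacheF_inv participants cache c hinv⟩

-- the whole query loop
theorem pvMain (participants : List (List String)) (qs : List String) (ans : List Int)
    (cache : PySem.Dict (List Int × List Int) (PySem.Dict (List String) (List (List Int))))
    (hinv : pvInv participants cache) :
    (qs.foldl (pvQueryStep participants) (ans, cache)).1
      = ans ++ qs.map (pvAnsA participants) := by
  induction qs generalizing ans cache with
  | nil => simp
  | cons c qs ih =>
    obtain ⟨h1, h2⟩ := pvStepCorrect participants ans cache c hinv
    rw [List.foldl_cons]
    have : pvQueryStep participants (ans, cache) c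
        = ((pvQueryStep participants (ans, cache) c).1, (pvQueryStep participants (ans, cache) c).2) := rfl
    rw [this, h1, ih _ _ h2]
    simp

-- ===== VERDICT (by name: the statement is the Claim_ definition above) =====
theorem solution_spec : Claim_equal_solution := by
  intro infos query _ _
  show solution infos query = solution_alt infos query
  simp only [solution, solution_alt, PySem.List.foldl_append_singleton_eq_map, List.nil_append]
  rw [pvMain _ _ _ _ (fun sig idx h => by simp [PySem.Dict.get?_empty] at h)]
  rw [List.nil_append]
  refine List.map_congr_left fun command _ => ?_
  rw [pvFoldFilter]
  rfl
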